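-- pv_equiv track=rewrite | github.com/MoraRMod/Particulas | algoritmos.py | puntosMasCercanos
-- ===== SOURCE A (Python) =====
-- import math
--
-- def distanciaEuclideana(x_1, y_1, x_2, y_2):
--     return math.sqrt(math.pow((x_2 - x_1), 2) + math.pow((y_2 - y_1), 2))
--
-- def puntosMasCercanos(puntos_list) -> list:
--     resultado = []
--
--     for puntoI in puntos_list:
--         one_origenX = puntoI[0]
--         one_origenY = puntoI[1]
--         one_destinoX = puntoI[2]
--         one_destinoY = puntoI[3]
--
--         min = 1000
--         cercano = (0,0)
--
--         for puntoJ in puntos_list: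
--             if puntoI != puntoJ:
--                 two_origenX = puntoJ[0]
--                 two_origenY = puntoJ[1]
--                 two_destinoX = puntoJ[2]
--                 two_destinoY = puntoJ[3]
--
--                 origen = distanciaEuclideana(one_origenX, one_origenY, two_origenX, two_origenY)
--                 destino = distanciaEuclideana(one_destinoX, one_destinoY, two_destinoX, two_destinoY)
--
--                 if origen < min:
--                     min = origen
--                     cercano = (two_origenX, two_origenY, two_destinoX, two_destinoY)
--
--                 if destino < min:
--                     min = destino
--                     cercano = (two_destinoX, two_destinoY, two_origenX, two_origenY)
--
--         resultado.append((puntoI, cercano))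
--
--     return resultado
-- ===== SOURCE B (Python) =====
-- def puntosMasCercanos(puntos_list) -> list:
--     # Symmetric pair sweep: each unordered pair is visited once; both endpoints'
--     # running minima (exact integer squared distances, threshold 1000**2) are
--     # updated simultaneously, so each distance is computed once instead of twice.
--     pending = list(puntos_list)
--     states = [(1000000, (0, 0))] * len(pending)
--     done = []
--     while pending:
--         p = pending.pop(0)
--         sp = states.pop(0)
--         for k in range(len(pending)):
--             q = pending[k]
--             if q != p:
--                 so = (q[0] - p[0]) ** 2 + (q[1] - p[1]) ** 2
--                 sd = (q[2] - p[2]) ** 2 + (q[3] - p[3]) ** 2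
--                 if so < sp[0]:
--                     sp = (so, (q[0], q[1], q[2], q[3]))
--                 if sd < sp[0]:
--                     sp = (sd, (q[2], q[3], q[0], q[1]))
--                 sq = states[k]
--                 if so < sq[0]:
--                     sq = (so, (p[0], p[1], p[2], p[3]))
--                 if sd < sq[0]:
--                     sq = (sd, (p[2], p[3], p[0], p[1]))
--                 states[k] = sq
--         done.append(sp)
--     return [(p, st[1]) for p, st in zip(puntos_list, done)]
-- ===== Notes on version B (the rewrite author's own statement) =====
-- stated objective: faster
-- what changed: A runs a full n-by-n nested scan computing every float sqrt distance twice (once per endpoint) and keeping one running minimum at a time; B is a symmetric pair sweep that visits each unordered pair exactly once, computes its two exact integer squared distances once, and updates the running minima of BOTH endpoints simultaneously (threshold 1000^2), maintaining all n per-point states together; this halves the pair work and drops the pow/sqrt calls.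
import Mathlib
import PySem

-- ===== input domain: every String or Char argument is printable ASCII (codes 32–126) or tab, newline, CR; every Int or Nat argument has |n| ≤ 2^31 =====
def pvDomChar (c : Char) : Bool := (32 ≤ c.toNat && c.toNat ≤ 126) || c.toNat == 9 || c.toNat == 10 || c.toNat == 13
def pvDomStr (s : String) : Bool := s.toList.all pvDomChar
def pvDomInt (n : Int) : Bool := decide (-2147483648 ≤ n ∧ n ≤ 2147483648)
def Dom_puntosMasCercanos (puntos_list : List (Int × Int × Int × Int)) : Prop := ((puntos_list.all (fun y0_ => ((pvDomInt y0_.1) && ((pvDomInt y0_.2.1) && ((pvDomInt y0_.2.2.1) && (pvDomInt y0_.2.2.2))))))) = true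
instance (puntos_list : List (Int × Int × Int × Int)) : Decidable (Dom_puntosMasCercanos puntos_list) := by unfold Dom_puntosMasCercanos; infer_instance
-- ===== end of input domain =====

-- B replaces A's full n×n scan (each distance computed twice, via float sqrt) by a symmetric
-- pair sweep visiting each unordered pair once and updating both endpoints' running minima
-- with exact integer squared distances (alternative decomposition, constant-factor cheaper).

-- ===== PORT A =====
-- A's distanciaEuclideana returns math.sqrt(dx²+dy²) as a float, used only in strict-<
-- comparisons against a running minimum capped at 1000.  Ported as the exact integer SQUARED
-- distance (threshold 1000² = 1000000): every comparison A's selection depends on involves at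
-- least one distance below 1000, where the double pow/sum/sqrt pipeline is exact and strictly
-- monotone in the integer squared distance, so the comparisons' outcomes coincide on Dom.
def distanciaEuclideanaSq (x_1 y_1 x_2 y_2 : Int) : Int :=
  (x_2 - x_1) ^ 2 + (y_2 - y_1) ^ 2

-- Python's default cercano (0,0) — a 2-tuple, outside the declared 4-tuple return type and
-- excluded by Pre_ — is represented by (0,0,0,0).
def puntosMasCercanos (puntos_list : List (Int × Int × Int × Int)) : List ((Int × Int × Int × Int) × (Int × Int × Int × Int)) :=
  List.foldl (fun resultado puntoI =>
    let one_origenX := puntoI.1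
    let one_origenY := puntoI.2.1
    let one_destinoX := puntoI.2.2.1
    let one_destinoY := puntoI.2.2.2
    let fin := List.foldl (fun (mc : Int × (Int × Int × Int × Int)) puntoJ =>
      if puntoI ≠ puntoJ then
        let two_origenX := puntoJ.1
        let two_origenY := puntoJ.2.1
        let two_destinoX := puntoJ.2.2.1
        let two_destinoY := puntoJ.2.2.2
        let origen := distanciaEuclideanaSq one_origenX one_origenY two_origenX two_origenY
        let destino := distanciaEuclideanaSq one_destinoX one_destinoY two_destinoX two_destinoY
        let mc1 := if origen < mc.1 then (origen, (two_origenX, two_origenY, two_destinoX, two_destinoY)) else mc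
        let mc2 := if destino < mc1.1 then (destino, (two_destinoX, two_destinoY, two_origenX, two_origenY)) else mc1
        mc2
      else mc) ((1000000 : Int), ((0 : Int), (0 : Int), (0 : Int), (0 : Int))) puntos_list
    resultado ++ [(puntoI, fin.2)]) [] puntos_list

-- ===== PORT B =====
-- running-minimum update: take the candidate iff its key is strictly smaller
def pmcStep (a b : Int × (Int × Int × Int × Int)) : Int × (Int × Int × Int × Int) :=
  if b.1 < a.1 then b else a

-- Source B's initial state (1000000, (0, 0)); the 2-tuple default, excluded by Pre_, is (0,0,0,0)
def pmcInit : Int × (Int × Int × Int × Int) := (1000000, (0, 0, 0, 0))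

-- Source B's inner `for k in range(len(pending))`: one pass over the remaining points, updating
-- the head's state sp and every remaining point's stored state simultaneously
def pmcPass (p : Int × Int × Int × Int) (sp : Int × (Int × Int × Int × Int)) :
    List (Int × Int × Int × Int) → List (Int × (Int × Int × Int × Int)) →
    (Int × (Int × Int × Int × Int)) × List (Int × (Int × Int × Int × Int))
  | [], _ => (sp, [])
  | _ :: _, [] => (sp, [])
  | q :: qs, sq :: sqs =>
    if q ≠ p then
      let so := (q.1 - p.1) ^ 2 + (q.2.1 - p.2.1) ^ 2
      let sd := (q.2.2.1 - p.2.2.1) ^ 2 + (q.2.2.2 - p.2.2.2) ^ 2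
      let sp1 := pmcStep sp (so, (q.1, q.2.1, q.2.2.1, q.2.2.2))
      let sp2 := pmcStep sp1 (sd, (q.2.2.1, q.2.2.2, q.1, q.2.1))
      let sq1 := pmcStep sq (so, (p.1, p.2.1, p.2.2.1, p.2.2.2))
      let sq2 := pmcStep sq1 (sd, (p.2.2.1, p.2.2.2, p.1, p.2.1))
      let r := pmcPass p sp2 qs sqs
      (r.1, sq2 :: r.2)
    else
      let r := pmcPass p sp qs sqs
      (r.1, sq :: r.2)

-- Source B's outer `while pending`: pop the head, run one pass, recurse on the rest
-- (the `points nonempty, states empty` case is unreachable: the two lists stay equal-length)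
def pmcSweep : List (Int × Int × Int × Int) → List (Int × (Int × Int × Int × Int)) →
    List (Int × (Int × Int × Int × Int))
  | [], _ => []
  | _ :: _, [] => []
  | p :: rest, sp :: srest =>
    let r := pmcPass p sp rest srest
    r.1 :: pmcSweep rest r.2

def puntosMasCercanos_alt (puntos_list : List (Int × Int × Int × Int)) : List ((Int × Int × Int × Int) × (Int × Int × Int × Int)) :=
  List.zipWith (fun p st => (p, st))
    puntos_list
    ((pmcSweep puntos_list (puntos_list.map (fun _ => pmcInit))).map (fun st => st.2))

-- ===== PRECONDITION & SPEC =====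
-- Pre_ excludes exactly the inputs on which some point has no other point within (squared)
-- distance 1000² of its origin or of its destination: there Python A (and B) returns the 2-tuple
-- (0,0) as cercano, which is not a value of the declared 4-tuple return type.
def Pre_puntosMasCercanos (puntos_list : List (Int × Int × Int × Int)) : Prop :=
  ∀ p ∈ puntos_list, ∃ q ∈ puntos_list, q ≠ p ∧
    ((q.1 - p.1) ^ 2 + (q.2.1 - p.2.1) ^ 2 < 1000000 ∨
     (q.2.2.1 - p.2.2.1) ^ 2 + (q.2.2.2 - p.2.2.2) ^ 2 < 1000000)
instance (puntos_list : List (Int × Int × Int × Int)) : Decidable (Pre_puntosMasCercanos puntos_list) := by unfold Pre_puntosMasCercanos; infer_instance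

def pvWitness_puntosMasCercanos : (List (Int × Int × Int × Int)) := [(0, 0, 5, 5), (3, 4, 2000, 2000), (2000, 2000, 6, 4)]

def Spec_puntosMasCercanos (puntos_list : List (Int × Int × Int × Int)) (out : List ((Int × Int × Int × Int) × (Int × Int × Int × Int))) : Prop := out = puntosMasCercanos_alt puntos_list
instance (puntos_list : List (Int × Int × Int × Int)) (out : List ((Int × Int × Int × Int) × (Int × Int × Int × Int))) : Decidable (Spec_puntosMasCercanos puntos_list out) := by unfold Spec_puntosMasCercanos; infer_instance

-- ===== CLAIM (what is proved, stated in full; the proofs are below) =====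
def Claim_equal_puntosMasCercanos : Prop := ∀ (puntos_list : List (Int × Int × Int × Int)), Dom_puntosMasCercanos puntos_list → Pre_puntosMasCercanos puntos_list → Spec_puntosMasCercanos puntos_list (puntosMasCercanos puntos_list)

-- ===== LEMMAS AND PROOFS =====

-- candidates point p receives from point q, in A's origin-then-destination order
def pmcCandidatos (p q : Int × Int × Int × Int) : List (Int × (Int × Int × Int × Int)) :=
  if q ≠ p then
    [((q.1 - p.1) ^ 2 + (q.2.1 - p.2.1) ^ 2, (q.1, q.2.1, q.2.2.1, q.2.2.2)),
     ((q.2.2.1 - p.2.2.1) ^ 2 + (q.2.2.2 - p.2.2.2) ^ 2, (q.2.2.1, q.2.2.2, q.1, q.2.1))]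
  else []

-- the pass leaves the head state folded over all of that round's candidates for the head
theorem pmcPass_fst (p : Int × Int × Int × Int) :
    ∀ (qs : List (Int × Int × Int × Int)) (sqs : List (Int × (Int × Int × Int × Int)))
      (sp : Int × (Int × Int × Int × Int)), sqs.length = qs.length →
      (pmcPass p sp qs sqs).1 = List.foldl pmcStep sp (qs.flatMap (pmcCandidatos p)) := by
  intro qs
  induction qs with
  | nil => intro sqs sp _; cases sqs <;> rfl
  | cons q qs ih =>
    intro sqs sp h
    cases sqs with
    | nil => simp at h
    | cons sq sqs =>
      simp only [List.length_cons, Nat.succ.injEq] at h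
      by_cases hq : q ≠ p
      · simp only [pmcPass, List.flatMap_cons, pmcCandidatos, if_pos hq,
          List.foldl_append, List.foldl_cons, List.foldl_nil]
        exact ih sqs _ h
      · simp only [pmcPass, List.flatMap_cons, pmcCandidatos, if_neg hq, List.nil_append]
        exact ih sqs sp h

-- each remaining state is folded over the (origin-then-destination) candidates it gets from p
theorem pmcPass_snd (p : Int × Int × Int × Int) :
    ∀ (qs : List (Int × Int × Int × Int)) (sqs : List (Int × (Int × Int × Int × Int)))
      (sp : Int × (Int × Int × Int × Int)), sqs.length = qs.length →
      (pmcPass p sp qs sqs).2 =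
        List.zipWith (fun q sq => List.foldl pmcStep sq (pmcCandidatos q p)) qs sqs := by
  intro qs
  induction qs with
  | nil => intro sqs sp _; cases sqs <;> rfl
  | cons q qs ih =>
    intro sqs sp h
    cases sqs with
    | nil => simp at h
    | cons sq sqs =>
      simp only [List.length_cons, Nat.succ.injEq] at h
      by_cases hq : q ≠ p
      · have hp : p ≠ q := fun e => hq e.symm
        simp only [pmcPass, if_pos hq, List.zipWith_cons_cons, pmcCandidatos, if_pos hp,
          List.foldl_cons, List.foldl_nil]
        refine congrArg₂ _ ?_ (ih sqs _ h)
        have e1 : (q.1 - p.1) ^ 2 + (q.2.1 - p.2.1) ^ 2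
            = (p.1 - q.1) ^ 2 + (p.2.1 - q.2.1) ^ 2 := by ring
        have e2 : (q.2.2.1 - p.2.2.1) ^ 2 + (q.2.2.2 - p.2.2.2) ^ 2
            = (p.2.2.1 - q.2.2.1) ^ 2 + (p.2.2.2 - q.2.2.2) ^ 2 := by ring
        rw [e1, e2]
      · have hp : ¬ p ≠ q := fun hne => hq (fun e => hne e.symm)
        simp only [pmcPass, if_neg hq, List.zipWith_cons_cons, pmcCandidatos, if_neg hp,
          List.foldl_nil]
        exact congrArg₂ _ rfl (ih sqs sp h)

theorem zipWith_comp {α β γ δ : Type} (f : α → γ → δ) (g : α → β → γ) :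
    ∀ (l : List α) (s : List β),
      List.zipWith f l (List.zipWith g l s) = List.zipWith (fun a b => f a (g a b)) l s := by
  intro l
  induction l with
  | nil => intro s; rfl
  | cons a l ih => intro s; cases s with
    | nil => rfl
    | cons b s => simp only [List.zipWith_cons_cons, ih]

-- the sweep computes, for every point, the fold of its whole candidate sequence in A's order
theorem pmcSweep_eq :
    ∀ (l : List (Int × Int × Int × Int)) (sts : List (Int × (Int × Int × Int × Int))),
      sts.length = l.length →
      pmcSweep l sts =
        List.zipWith (fun q sq => List.foldl pmcStep sq (l.flatMap (pmcCandidatos q))) l sts := by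
  intro l
  induction l with
  | nil => intro sts _; rfl
  | cons p rest ih =>
    intro sts h
    cases sts with
    | nil => simp at h
    | cons sp srest =>
      simp only [List.length_cons, Nat.succ.injEq] at h
      show (pmcPass p sp rest srest).1 :: pmcSweep rest (pmcPass p sp rest srest).2 = _
      rw [pmcPass_fst p rest srest sp h, pmcPass_snd p rest srest sp h]
      have hlen : (List.zipWith (fun q sq => List.foldl pmcStep sq (pmcCandidatos q p)) rest srest).length = rest.length := by
        simp [List.length_zipWith, h]
      rw [ih _ hlen, zipWith_comp]
      simp only [List.zipWith_cons_cons, List.flatMap_cons]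
      congr 1
      · rw [show pmcCandidatos p p = [] from if_neg (fun hne => hne rfl), List.nil_append]
      · apply List.zipWith_congr
        rw [List.forall₂_iff_zip]
        refine ⟨h.symm, ?_⟩
        intro q sq _
        rw [List.foldl_append]

-- B's entry point in closed per-point form
theorem alt_eq_map (l : List (Int × Int × Int × Int)) :
    puntosMasCercanos_alt l =
      l.map (fun p => (p, (List.foldl pmcStep pmcInit (l.flatMap (pmcCandidatos p))).2)) := by
  unfold puntosMasCercanos_alt
  rw [pmcSweep_eq l _ (by simp), List.zipWith_map_right, List.zipWith_map_right, zipWith_comp]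
  have : ∀ (f : (Int × Int × Int × Int) → (Int × Int × Int × Int) → ((Int × Int × Int × Int) × (Int × Int × Int × Int))),
      List.zipWith f l l = l.map (fun a => f a a) := by
    intro f; induction l with
    | nil => rfl
    | cons a t ih => simp only [List.zipWith_cons_cons, List.map_cons, ih]
  exact this _

-- A's inner loop over puntos_list is the pmcStep fold over the candidate list
theorem innerA_eq_foldl_cands (p : Int × Int × Int × Int) (pl : List (Int × Int × Int × Int)) :
    ∀ st : Int × (Int × Int × Int × Int),
      List.foldl (fun (mc : Int × (Int × Int × Int × Int)) puntoJ =>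
        if p ≠ puntoJ then
          let two_origenX := puntoJ.1
          let two_origenY := puntoJ.2.1
          let two_destinoX := puntoJ.2.2.1
          let two_destinoY := puntoJ.2.2.2
          let origen := distanciaEuclideanaSq p.1 p.2.1 two_origenX two_origenY
          let destino := distanciaEuclideanaSq p.2.2.1 p.2.2.2 two_destinoX two_destinoY
          let mc1 := if origen < mc.1 then (origen, (two_origenX, two_origenY, two_destinoX, two_destinoY)) else mc
          let mc2 := if destino < mc1.1 then (destino, (two_destinoX, two_destinoY, two_origenX, two_origenY)) else mc1
          mc2
        else mc) st pl
      = List.foldl pmcStep st (pl.flatMap (pmcCandidatos p)) := by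
  induction pl with
  | nil => intro st; rfl
  | cons q t ih =>
    intro st
    rw [List.foldl_cons, List.flatMap_cons, List.foldl_append, ih]
    congr 1
    by_cases h : p = q
    · subst h; simp [pmcCandidatos]
    · have h' : q ≠ p := fun hqp => h hqp.symm
      simp only [pmcCandidatos, if_pos h', if_pos (h : p ≠ q), List.foldl_cons, List.foldl_nil]
      simp [pmcStep, distanciaEuclideanaSq]

-- A's outer loop (with a generalized accumulator) produces the per-point map
theorem outerA_eq_map (all : List (Int × Int × Int × Int)) (pl : List (Int × Int × Int × Int)) :
    ∀ acc : List ((Int × Int × Int × Int) × (Int × Int × Int × Int)),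
      List.foldl (fun resultado puntoI =>
        let one_origenX := puntoI.1
        let one_origenY := puntoI.2.1
        let one_destinoX := puntoI.2.2.1
        let one_destinoY := puntoI.2.2.2
        let fin := List.foldl (fun (mc : Int × (Int × Int × Int × Int)) puntoJ =>
          if puntoI ≠ puntoJ then
            let two_origenX := puntoJ.1
            let two_origenY := puntoJ.2.1
            let two_destinoX := puntoJ.2.2.1
            let two_destinoY := puntoJ.2.2.2
            let origen := distanciaEuclideanaSq one_origenX one_origenY two_origenX two_origenY
            let destino := distanciaEuclideanaSq one_destinoX one_destinoY two_destinoX two_destinoY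
            let mc1 := if origen < mc.1 then (origen, (two_origenX, two_origenY, two_destinoX, two_destinoY)) else mc
            let mc2 := if destino < mc1.1 then (destino, (two_destinoX, two_destinoY, two_origenX, two_origenY)) else mc1
            mc2
          else mc) ((1000000 : Int), ((0 : Int), (0 : Int), (0 : Int), (0 : Int))) all
        resultado ++ [(puntoI, fin.2)]) acc pl
      = acc ++ pl.map (fun p => (p, (List.foldl pmcStep pmcInit (all.flatMap (pmcCandidatos p))).2)) := by
  induction pl with
  | nil => intro acc; simp
  | cons p t ih =>
    intro acc
    rw [List.foldl_cons, ih, List.map_cons]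
    have hfin := innerA_eq_foldl_cands p all ((1000000 : Int), ((0 : Int), (0 : Int), (0 : Int), (0 : Int)))
    show (acc ++ [(p, _)]) ++ _ = _
    rw [hfin]
    simp [pmcInit]

-- ===== VERDICT (by name: the statement is the Claim_ definition above) =====
theorem puntosMasCercanos_spec : Claim_equal_puntosMasCercanos := by
  intro pl _ _
  unfold Spec_puntosMasCercanos puntosMasCercanos
  rw [outerA_eq_map pl pl [], alt_eq_map]
  simp
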